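-- pv_equiv track=rewrite | github.com/2Sumin/2025_algorithm_study | 프로그래머스/2/42586. 기능개발/기능개발.py | solution
-- ===== SOURCE A (Python) =====
-- import math
--
-- def solution(progresses, speeds):
--     ans = [] # 정답
--     stack = []
--     # 완성까지 남은 날의 수를 스택에 작성
--     for i in range(len(progresses)-1, -1, -1):
--         stack.append(math.ceil((100-progresses[i])/speeds[i]))
--     # 스택이 전부 빌 때까지 반복
--     # 스택의 top 요소를 제거하는데, 아래 요소 중 이전에 완성된 것이 있으면 pop
--     while stack:
--         cnt = 1
--         current_day = stack[-1]
--         stack.pop()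
--         while stack and stack[-1] <= current_day:
--             stack.pop()
--             cnt += 1
--         ans.append(cnt)
--     return ans
-- ===== SOURCE B (Python) =====
-- import math
--
-- def solution(progresses, speeds):
--     days = [math.ceil((100 - p) / s) for p, s in zip(progresses, speeds)]
--     ans = []
--     lead = 0
--     count = 0
--     for d in days:
--         if count and d <= lead:
--             count += 1
--         else:
--             if count:
--                 ans.append(count)
--             lead = d
--             count = 1
--     if count:
--         ans.append(count)
--     return ans
-- ===== Notes on version B (the rewrite author's own statement) =====
-- stated objective: simpler
-- what changed: A builds a reversed stack of completion days and unwinds it with a nested pop-while loop; B computes the days forward with zip and makes one forward pass keeping only the current group's leading day and a counter, so the explicit stack and the nested inner loop disappear.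
import Mathlib
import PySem

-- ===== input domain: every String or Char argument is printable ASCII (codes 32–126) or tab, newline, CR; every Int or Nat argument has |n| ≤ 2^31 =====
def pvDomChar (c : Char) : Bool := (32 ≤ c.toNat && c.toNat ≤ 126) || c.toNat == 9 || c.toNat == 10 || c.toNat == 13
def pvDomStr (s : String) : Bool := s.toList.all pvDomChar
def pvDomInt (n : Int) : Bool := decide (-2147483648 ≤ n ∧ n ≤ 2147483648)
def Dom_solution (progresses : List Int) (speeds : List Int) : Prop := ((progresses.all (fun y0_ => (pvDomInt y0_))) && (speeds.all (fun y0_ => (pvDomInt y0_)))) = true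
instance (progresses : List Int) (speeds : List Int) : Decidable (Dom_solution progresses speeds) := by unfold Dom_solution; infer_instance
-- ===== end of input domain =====

-- B replaces A's reversed stack + nested pop-while unwinding by a single forward pass
-- with a scalar "leading day" and a counter (objective: simpler).

-- math.ceil((100 - p) / s), exact on the Dom_ int range (the float quotient of ints of
-- magnitude ≤ 2^32 is too accurate for its ceiling to differ from the rational ceiling);
-- both Pythons contain this same expression.
def pvCeilDiv (p s : Int) : Int := -(PySem.Int.floordiv (-(100 - p)) s)

-- ===== PORT A =====
-- inner 'while stack and stack[-1] <= current_day: stack.pop(); cnt += 1'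
def pvPopWhile (stack : List Int) (day : Int) (cnt : Int) : List Int × Int :=
  if stack = [] then (stack, cnt)
  else if PySem.List.pyGetD stack (-1) 0 ≤ day then
    pvPopWhile stack.dropLast day (cnt + 1)
  else (stack, cnt)
termination_by stack.length
decreasing_by
  rename_i h _
  have := List.length_pos_of_ne_nil h
  have := stack.length_dropLast
  omega

-- needed by pvOuter's termination
theorem pvPopWhile_len (stack : List Int) : ∀ (day cnt : Int),
    (pvPopWhile stack day cnt).1.length ≤ stack.length := by
  induction stack using List.reverseRecOn with
  | nil => intro day cnt; rw [pvPopWhile]; simp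
  | append_singleton xs x ih =>
    intro day cnt
    rw [pvPopWhile, if_neg (by simp : ¬(xs ++ [x] = []))]
    simp only [List.dropLast_concat]
    split
    · exact le_trans (ih day (cnt + 1)) (by simp)
    · simp

-- outer 'while stack: …'
def pvOuter (stack : List Int) (ans : List Int) : List Int :=
  if stack = [] then ans
  else
    let current := PySem.List.pyGetD stack (-1) 0
    let r := pvPopWhile stack.dropLast current 1
    pvOuter r.1 (ans ++ [r.2])
termination_by stack.length
decreasing_by
  rename_i h
  have := List.length_pos_of_ne_nil h
  have h1 := pvPopWhile_len stack.dropLast (PySem.List.pyGetD stack (-1) 0) 1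
  have h2 := stack.length_dropLast
  omega

def solution (progresses : List Int) (speeds : List Int) : List Int :=
  let stack := (PySem.List.pyRange (PySem.List.len progresses - 1) (-1) (-1)).foldl
    (fun st i => st ++ [pvCeilDiv (PySem.List.pyGetD progresses i 0) (PySem.List.pyGetD speeds i 0)]) []
  pvOuter stack []

-- ===== PORT B =====
-- one forward step: extend the current group or flush it and start a new one
def pvGroupStep (st : List Int × Int × Int) (d : Int) : List Int × Int × Int :=
  match st with
  | (ans, lead, count) =>
    if count ≠ 0 ∧ d ≤ lead then (ans, lead, count + 1)
    else ((if count ≠ 0 then ans ++ [count] else ans), d, 1)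

def solution_alt (progresses : List Int) (speeds : List Int) : List Int :=
  let days := (progresses.zip speeds).map (fun q => pvCeilDiv q.1 q.2)
  let r := days.foldl pvGroupStep ([], 0, 0)
  if r.2.2 ≠ 0 then r.1 ++ [r.2.2] else r.1

-- ===== PRECONDITION & SPEC =====
-- Pre_ excludes exactly the inputs where the Python A raises: IndexError when speeds is
-- shorter than progresses, ZeroDivisionError when a used speed is 0.
def Pre_solution (progresses : List Int) (speeds : List Int) : Prop :=
  progresses.length ≤ speeds.length ∧ ∀ x ∈ speeds.take progresses.length, x ≠ 0
instance (progresses : List Int) (speeds : List Int) : Decidable (Pre_solution progresses speeds) := by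
  unfold Pre_solution; infer_instance

def pvWitness_solution : List Int × List Int := ([93, 30, 55], [1, 30, 5])

def Spec_solution (progresses : List Int) (speeds : List Int) (out : List Int) : Prop := out = solution_alt progresses speeds
instance (progresses : List Int) (speeds : List Int) (out : List Int) : Decidable (Spec_solution progresses speeds out) := by unfold Spec_solution; infer_instance

-- ===== CLAIM (what is proved, stated in full; the proofs are below) =====
def Claim_equal_solution : Prop := ∀ (progresses : List Int) (speeds : List Int), Dom_solution progresses speeds → Pre_solution progresses speeds → Spec_solution progresses speeds (solution progresses speeds)

-- ===== LEMMAS AND PROOFS =====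

-- reference grouping of the forward days list
def pvGroups : List Int → List Int
  | [] => []
  | d :: rest =>
    (1 + ((rest.takeWhile (fun x => decide (x ≤ d))).length : Int))
      :: pvGroups (rest.dropWhile (fun x => decide (x ≤ d)))
termination_by l => l.length
decreasing_by
  have := List.length_dropWhile_le (fun x => decide (x ≤ d)) rest
  simp; omega

theorem pvPopWhile_reverse (l : List Int) (d : Int) :
    ∀ c, pvPopWhile l.reverse d c =
      ((l.dropWhile (fun x => decide (x ≤ d))).reverse,
       c + ((l.takeWhile (fun x => decide (x ≤ d))).length : Int)) := by
  induction l with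
  | nil => intro c; rw [pvPopWhile]; simp
  | cons x xs ih =>
    intro c
    rw [pvPopWhile, if_neg (by simp : ¬((x :: xs).reverse = []))]
    simp only [List.reverse_cons, List.dropLast_concat,
      PySem.List.pyGetD_neg_one_append_singleton]
    by_cases hx : x ≤ d
    · rw [if_pos hx, ih]
      simp only [List.takeWhile_cons, List.dropWhile_cons, hx, decide_true, Prod.mk.injEq]
      refine ⟨rfl, ?_⟩
      push_cast [List.length_cons]
      ring
    · rw [if_neg hx]
      simp [hx]

theorem pvOuter_reverse (l : List Int) :
    ∀ ans, pvOuter l.reverse ans = ans ++ pvGroups l := by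
  induction l using pvGroups.induct with
  | case1 => intro ans; rw [pvOuter.eq_def]; simp [pvGroups]
  | case2 d rest ih =>
    intro ans
    rw [pvOuter.eq_def, if_neg (by simp : ¬((d :: rest).reverse = []))]
    simp only [List.reverse_cons, List.dropLast_concat,
      PySem.List.pyGetD_neg_one_append_singleton, pvPopWhile_reverse, ih]
    simp [pvGroups]

theorem pvFold_groups (days : List Int) :
    ∀ (ans : List Int) (lead count : Int), 0 < count →
      (if (days.foldl pvGroupStep (ans, lead, count)).2.2 ≠ 0 then
        (days.foldl pvGroupStep (ans, lead, count)).1 ++ [(days.foldl pvGroupStep (ans, lead, count)).2.2]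
       else (days.foldl pvGroupStep (ans, lead, count)).1) =
      ans ++ ((count + ((days.takeWhile (fun x => decide (x ≤ lead))).length : Int))
              :: pvGroups (days.dropWhile (fun x => decide (x ≤ lead)))) := by
  induction days with
  | nil =>
    intro ans lead count hc
    simp [pvGroups]
    omega
  | cons d rest ih =>
    intro ans lead count hc
    simp only [List.foldl_cons, pvGroupStep]
    by_cases hd : d ≤ lead
    · rw [if_pos (show count ≠ 0 ∧ d ≤ lead from ⟨by omega, hd⟩),
        ih ans lead (count + 1) (by omega)]
      simp only [List.takeWhile_cons, List.dropWhile_cons, hd, decide_true,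
        List.append_cancel_left_eq, List.cons.injEq]
      constructor
      · push_cast [List.length_cons]; ring
      · rfl
    · rw [if_neg (show ¬(count ≠ 0 ∧ d ≤ lead) from fun hh => hd hh.2),
        if_pos (show count ≠ 0 from by omega),
        ih (ans ++ [count]) d 1 (by omega)]
      simp only [List.takeWhile_cons, List.dropWhile_cons, hd, decide_false,
        List.append_assoc, List.singleton_append]
      simp [pvGroups]

theorem solution_alt_eq_groups (p s : List Int) :
    solution_alt p s = pvGroups ((p.zip s).map (fun q => pvCeilDiv q.1 q.2)) := by
  unfold solution_alt
  cases hd : (p.zip s).map (fun q => pvCeilDiv q.1 q.2) with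
  | nil => simp [pvGroups]
  | cons d rest =>
    simp only [List.foldl_cons, pvGroupStep,
      if_neg (show ¬((0:Int) ≠ 0 ∧ d ≤ 0) by simp), if_neg (show ¬((0:Int) ≠ 0) by simp)]
    rw [pvFold_groups rest [] d 1 (by omega)]
    simp [pvGroups]

theorem stack_eq_rev_days (p s : List Int) (h : p.length ≤ s.length) :
    (PySem.List.pyRange (PySem.List.len p - 1) (-1) (-1)).foldl
      (fun st i => st ++ [pvCeilDiv (PySem.List.pyGetD p i 0) (PySem.List.pyGetD s i 0)]) []
    = ((p.zip s).map (fun q => pvCeilDiv q.1 q.2)).reverse := by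
  rw [PySem.List.foldl_append_singleton_eq_map, List.nil_append,
    PySem.List.pyRange_neg_one, List.map_map]
  have hn : (PySem.List.len p - 1 - -1).toNat = p.length := by
    simp only [PySem.List.len_eq]; omega
  have hM : ((p.zip s).map (fun q => pvCeilDiv q.1 q.2)).length = p.length := by
    simp; omega
  apply List.ext_getElem
  · simp; omega
  · intro i h1 h2
    rw [List.getElem_reverse]
    simp only [List.getElem_map, List.getElem_range, List.getElem_zip, Function.comp]
    have hi : i < p.length := by simpa [hn] using h1
    have h0p : (0:Int) ≤ PySem.List.len p - 1 - (i : Int) := by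
      simp only [PySem.List.len_eq]; omega
    rw [PySem.List.pyGetD_eq_getElem _ _ h0p (by simp only [PySem.List.len_eq]; omega),
        PySem.List.pyGetD_eq_getElem _ _ h0p (by simp only [PySem.List.len_eq]; omega)]
    have ht : (PySem.List.len p - 1 - (i : Int)).toNat = p.length - 1 - i := by
      simp only [PySem.List.len_eq]; omega
    simp only [ht, hM]

-- ===== VERDICT (by name: the statement is the Claim_ definition above) =====
theorem solution_spec : Claim_equal_solution := by
  intro p s _ hpre
  unfold Spec_solution solution
  simp only
  rw [stack_eq_rev_days p s hpre.1, pvOuter_reverse, List.nil_append,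
      solution_alt_eq_groups]
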